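-- pv_equiv track=rewrite | github.com/jack-chaudier/mirage | endogenous_context_theory/scripts/generate_training_data.py | _insert_lines_before_rule
-- ===== SOURCE A (Python) =====
-- from typing import Any, Dict, Iterable, List, Sequence, Tuple
--
-- def _insert_lines_before_rule(lines: List[str], new_lines: List[str]) -> List[str]:
--     if not new_lines:
--         return lines
--     rule_idx = next(
--         (idx for idx, line in enumerate(lines) if line.startswith("Rule reminder:")),
--         len(lines),
--     )
--     return lines[:rule_idx] + new_lines + lines[rule_idx:]
-- ===== SOURCE B (Python) =====
-- def _insert_lines_before_rule(lines, new_lines):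
--     if not new_lines:
--         return lines
--     out = []
--     inserted = False
--     for line in lines:
--         if not inserted and line.startswith("Rule reminder:"):
--             out.extend(new_lines)
--             inserted = True
--         out.append(line)
--     if not inserted:
--         out.extend(new_lines)
--     return out
-- ===== Notes on version B (the rewrite author's own statement) =====
-- stated objective: alternative
-- what changed: Replaced the enumerate/next index search plus three-way slice concatenation with a single streaming pass that interleaves the search and the construction using an 'inserted' flag, extending at the end if no match was found.
import Mathlib
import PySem

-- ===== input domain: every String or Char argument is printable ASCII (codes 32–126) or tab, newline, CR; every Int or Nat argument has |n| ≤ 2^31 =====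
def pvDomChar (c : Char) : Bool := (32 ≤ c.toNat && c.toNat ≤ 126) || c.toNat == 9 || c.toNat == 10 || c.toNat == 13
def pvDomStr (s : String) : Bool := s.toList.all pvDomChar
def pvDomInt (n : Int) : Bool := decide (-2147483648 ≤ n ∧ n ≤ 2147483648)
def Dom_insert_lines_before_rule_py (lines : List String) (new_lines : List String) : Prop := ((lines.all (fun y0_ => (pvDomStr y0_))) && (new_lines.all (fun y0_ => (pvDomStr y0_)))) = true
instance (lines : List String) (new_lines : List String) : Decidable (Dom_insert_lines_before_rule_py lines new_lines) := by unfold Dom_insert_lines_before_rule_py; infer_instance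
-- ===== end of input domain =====

-- B replaces the index-search-then-slice construction of A with a single streaming pass
-- carrying an 'inserted' flag (objective: alternative decomposition, same cost).


-- ===== PORT A =====
-- first index whose line startswith "Rule reminder:", defaulting to the list length
-- (the 'next(… enumerate …, len(lines))' expression)
def pvRuleIdx (lines : List String) : Nat :=
  match lines with
  | [] => 0
  | l :: rest => if PySem.Str.startswith l "Rule reminder:" then 0 else 1 + pvRuleIdx rest

def insert_lines_before_rule_py (lines : List String) (new_lines : List String) : List String :=
  if new_lines = [] then lines
  else
    let rule_idx : Nat := pvRuleIdx lines
    PySem.List.slice lines none (some (rule_idx : Int)) ++ new_lines ++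
      PySem.List.slice lines (some (rule_idx : Int)) none

-- ===== PORT B =====
-- the body of B's for-loop (named so the fold lemmas below can speak about it)
def pvStep (new_lines : List String) (acc : List String × Bool) (line : String) : List String × Bool :=
  if !acc.2 && PySem.Str.startswith line "Rule reminder:" then
    (acc.1 ++ new_lines ++ [line], true)
  else
    (acc.1 ++ [line], acc.2)

def insert_lines_before_rule_py_alt (lines : List String) (new_lines : List String) : List String :=
  if new_lines = [] then lines
  else
    let st := lines.foldl (pvStep new_lines) ([], false)
    if st.2 then st.1 else st.1 ++ new_lines

-- ===== PRECONDITION & SPEC =====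
def Spec_insert_lines_before_rule_py (lines : List String) (new_lines : List String) (out : List String) : Prop := out = insert_lines_before_rule_py_alt lines new_lines
instance (lines : List String) (new_lines : List String) (out : List String) : Decidable (Spec_insert_lines_before_rule_py lines new_lines out) := by unfold Spec_insert_lines_before_rule_py; infer_instance

-- ===== CLAIM (what is proved, stated in full; the proofs are below) =====
def Claim_equal_insert_lines_before_rule_py : Prop := ∀ (lines : List String) (new_lines : List String), Dom_insert_lines_before_rule_py lines new_lines → Spec_insert_lines_before_rule_py lines new_lines (insert_lines_before_rule_py lines new_lines)

-- ===== LEMMAS AND PROOFS =====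

theorem pvStep_true (new_lines : List String) (out : List String) (l : String) :
    pvStep new_lines (out, true) l = (out ++ [l], true) := by
  simp [pvStep]

theorem pvStep_false_pos (new_lines : List String) (out : List String) (l : String)
    (h : PySem.Str.startswith l "Rule reminder:" = true) :
    pvStep new_lines (out, false) l = (out ++ new_lines ++ [l], true) := by
  simp at h
  simp [pvStep, h]

theorem pvStep_false_neg (new_lines : List String) (out : List String) (l : String)
    (h : ¬ PySem.Str.startswith l "Rule reminder:" = true) :
    pvStep new_lines (out, false) l = (out ++ [l], false) := by
  simp at h
  simp [pvStep, h]

-- once inserted, the fold merely appends the remaining lines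
theorem pv_foldl_true (new_lines : List String) (rest : List String) (out : List String) :
    rest.foldl (pvStep new_lines) (out, true) = (out ++ rest, true) := by
  induction rest generalizing out with
  | nil => simp
  | cons l rest ih =>
    rw [List.foldl_cons, pvStep_true, ih]
    simp

-- the streaming pass (including the post-loop extend) computes A's take/insert/drop form
theorem pv_foldl_false (new_lines : List String) (lines : List String) (out : List String) :
    (let st := lines.foldl (pvStep new_lines) (out, false)
     if st.2 then st.1 else st.1 ++ new_lines)
    = out ++ lines.take (pvRuleIdx lines) ++ new_lines ++ lines.drop (pvRuleIdx lines) := by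
  induction lines generalizing out with
  | nil => simp [pvRuleIdx]
  | cons l rest ih =>
    by_cases h : PySem.Str.startswith l "Rule reminder:" = true
    · rw [List.foldl_cons, pvStep_false_pos _ _ _ h, pv_foldl_true]
      simp at h
      simp [pvRuleIdx, h]
    · have := ih (out ++ [l])
      rw [List.foldl_cons, pvStep_false_neg _ _ _ h]
      simp only at this ⊢
      rw [this]
      simp at h
      simp [pvRuleIdx, h, Nat.add_comm]

-- ===== VERDICT (by name: the statement is the Claim_ definition above) =====
theorem insert_lines_before_rule_py_spec : Claim_equal_insert_lines_before_rule_py := by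
  intro lines new_lines _
  unfold Spec_insert_lines_before_rule_py insert_lines_before_rule_py insert_lines_before_rule_py_alt
  by_cases hn : new_lines = []
  · simp [hn]
  · simp only [hn, ite_false]
    rw [PySem.List.slice_to_natCast, PySem.List.slice_from_natCast]
    have := pv_foldl_false new_lines lines []
    simp only [List.nil_append] at this
    rw [← this]
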